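-- pv_equiv track=rewrite | github.com/Williamzcy0929/Med2Vec_Plus | scripts/pca_cohort.py | iter_patients_from_seqs
-- ===== SOURCE A (Python) =====
-- def iter_patients_from_seqs(seqs):
--     """
--     Iterate over a flat sequence list and yield per-patient visit lists.
--
--     The input `seqs` is a flat list where a sentinel [ -1 ] indicates
--     the boundary between two patients.
--     """
--     buf = []
--     for v in seqs:
--         if isinstance(v, list) and len(v) == 1 and v[0] == -1:
--             # End of one patient
--             if buf:
--                 yield buf
--             buf = []
--         else:
--             # v is a visit; ensure we store a list
--             buf.append(v if isinstance(v, list) else [])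
--     if buf:
--         # Last patient
--         yield buf
-- ===== SOURCE B (Python) =====
-- def iter_patients_from_seqs(seqs):
--     """
--     Yield per-patient visit lists from a flat list, split at the [-1] sentinel.
--
--     Segment-scan decomposition: repeatedly find the extent of the next
--     sentinel-free run, emit it if non-empty, and drop through the sentinel.
--     """
--     def _is_sent(v):
--         return isinstance(v, list) and len(v) == 1 and v[0] == -1
--
--     rest = list(seqs)
--     while rest:
--         j = 0
--         while j < len(rest) and not _is_sent(rest[j]):
--             j += 1
--         if j > 0:
--             yield [v if isinstance(v, list) else [] for v in rest[:j]]
--         rest = rest[j + 1:]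
-- ===== Notes on version B (the rewrite author's own statement) =====
-- stated objective: alternative
-- what changed: Replaces A's element-by-element buffer accumulation with a segment-scan: repeatedly take the maximal sentinel-free run, yield it if non-empty, and skip past the sentinel.
import Mathlib
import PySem

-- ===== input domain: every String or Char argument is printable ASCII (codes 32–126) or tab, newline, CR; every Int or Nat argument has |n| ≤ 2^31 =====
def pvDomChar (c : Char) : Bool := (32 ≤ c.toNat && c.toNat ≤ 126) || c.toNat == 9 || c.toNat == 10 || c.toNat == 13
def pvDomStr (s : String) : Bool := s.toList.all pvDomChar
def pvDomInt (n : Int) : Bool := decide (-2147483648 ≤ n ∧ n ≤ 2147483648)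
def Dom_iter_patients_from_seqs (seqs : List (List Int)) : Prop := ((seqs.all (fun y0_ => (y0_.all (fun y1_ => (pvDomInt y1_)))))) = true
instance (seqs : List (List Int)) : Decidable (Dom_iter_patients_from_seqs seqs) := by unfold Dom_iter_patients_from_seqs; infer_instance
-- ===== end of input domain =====

-- B replaces A's element-by-element buffer accumulation with a segment-scan
-- (take the maximal sentinel-free run, emit it if non-empty, skip the sentinel);
-- objective: alternative decomposition, same O(n) cost. A is a generator; the
-- equivalence is about the list of yielded values.


-- ===== PORT A =====
-- 'isinstance(v, list) and len(v) == 1 and v[0] == -1'; under the type convention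
-- every v is a list, so the isinstance test is always true.
def isSentA (v : List Int) : Bool := (v.length == 1) && (v.headD 0 == -1)

-- fold state: (yielded so far, current buffer); final flush after the loop.
def iter_patients_from_seqs (seqs : List (List Int)) : List (List (List Int)) :=
  let st := seqs.foldl (fun (st : List (List (List Int)) × List (List Int)) v =>
    if isSentA v then
      (if st.2 ≠ [] then st.1 ++ [st.2] else st.1, [])
    else
      -- 'v if isinstance(v, list) else []' is the identity here (v is a list)
      (st.1, st.2 ++ [v])) ([], [])
  if st.2 ≠ [] then st.1 ++ [st.2] else st.1

-- ===== PORT B =====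
def isSentB (v : List Int) : Bool :=
  match v with
  | [x] => x == -1
  | _ => false

-- inner 'while j < len(rest) and not _is_sent(rest[j])' scan = takeWhile;
-- outer loop: recursion on the remaining suffix 'rest = rest[j+1:]'.
def iter_patients_from_seqs_alt (seqs : List (List Int)) : List (List (List Int)) :=
  match h : seqs with
  | [] => []
  | _ :: _ =>
    let seg := seqs.takeWhile (fun v => !isSentB v)
    (if seg.length > 0 then [seg] else []) ++
      iter_patients_from_seqs_alt (seqs.drop (seg.length + 1))
termination_by seqs.length
decreasing_by
  subst h
  simp only [List.length_drop, List.length_cons]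
  omega

-- ===== PRECONDITION & SPEC =====
def Spec_iter_patients_from_seqs (seqs : List (List Int)) (out : List (List (List Int))) : Prop := out = iter_patients_from_seqs_alt seqs
instance (seqs : List (List Int)) (out : List (List (List Int))) : Decidable (Spec_iter_patients_from_seqs seqs out) := by unfold Spec_iter_patients_from_seqs; infer_instance

-- ===== CLAIM (what is proved, stated in full; the proofs are below) =====
def Claim_equal_iter_patients_from_seqs : Prop := ∀ (seqs : List (List Int)), Dom_iter_patients_from_seqs seqs → Spec_iter_patients_from_seqs seqs (iter_patients_from_seqs seqs)

-- ===== LEMMAS AND PROOFS =====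

-- proof-only names for A's loop body and final flush
def stepA (st : List (List (List Int)) × List (List Int)) (v : List Int) :
    List (List (List Int)) × List (List Int) :=
  if isSentA v then
    (if st.2 ≠ [] then st.1 ++ [st.2] else st.1, [])
  else (st.1, st.2 ++ [v])

def finishA (st : List (List (List Int)) × List (List Int)) : List (List (List Int)) :=
  if st.2 ≠ [] then st.1 ++ [st.2] else st.1

-- reference recursion used by the proof only
def refSplit (buf : List (List Int)) : List (List Int) → List (List (List Int))
  | [] => if buf ≠ [] then [buf] else []
  | v :: rest =>
      if isSentA v then
        (if buf ≠ [] then [buf] else []) ++ refSplit [] rest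
      else refSplit (buf ++ [v]) rest

theorem isSent_eq (v : List Int) : isSentA v = isSentB v := by
  cases v with
  | nil => rfl
  | cons x t => cases t <;> simp [isSentA, isSentB]

theorem foldA_eq_ref (seqs : List (List Int)) :
    ∀ (out : List (List (List Int))) (buf : List (List Int)),
      finishA (seqs.foldl stepA (out, buf)) = out ++ refSplit buf seqs := by
  induction seqs with
  | nil => intro out buf; by_cases h : buf = [] <;> simp [refSplit, finishA, h]
  | cons v rest ih =>
    intro out buf
    by_cases hs : isSentA v
    · by_cases h : buf = [] <;>
        simp [List.foldl_cons, stepA, hs, h, ih, refSplit, List.append_assoc]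
    · simp [List.foldl_cons, stepA, hs, ih, refSplit]

theorem ref_eq_alt (seqs : List (List Int)) :
    ∀ (buf : List (List Int)),
      refSplit buf seqs =
        (if (buf ++ seqs.takeWhile (fun v => !isSentB v)).length > 0
         then [buf ++ seqs.takeWhile (fun v => !isSentB v)] else []) ++
          iter_patients_from_seqs_alt
            (seqs.drop ((seqs.takeWhile (fun v => !isSentB v)).length + 1)) := by
  induction seqs with
  | nil =>
    intro buf
    simp only [List.takeWhile_nil, List.drop_nil]
    rw [iter_patients_from_seqs_alt]
    by_cases h : buf = [] <;> simp [refSplit, h]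
  | cons v rest ih =>
    intro buf
    by_cases hs : isSentB v
    · have hsA : isSentA v := by rw [isSent_eq]; exact hs
      have hrec : refSplit [] rest = iter_patients_from_seqs_alt rest := by
        rw [ih []]
        cases rest with
        | nil =>
          simp only [List.takeWhile_nil, List.drop_nil, List.length_nil]
          rw [iter_patients_from_seqs_alt]
          simp
        | cons w t =>
          conv_rhs => rw [iter_patients_from_seqs_alt]
          simp [List.length_pos_iff]
      by_cases h : buf = [] <;>
        simp [refSplit, hsA, hs, h, hrec, List.length_pos_iff]
    · have hsA : ¬ isSentA v := by rw [isSent_eq]; exact hs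
      simp only [refSplit, if_neg hsA, ih (buf ++ [v]),
        List.takeWhile_cons, hs, Bool.not_false]
      simp [List.append_assoc]

theorem alt_eq_ref (seqs : List (List Int)) :
    iter_patients_from_seqs_alt seqs = refSplit [] seqs := by
  rw [ref_eq_alt seqs []]
  cases seqs with
  | nil =>
    simp only [List.takeWhile_nil, List.drop_nil, List.length_nil]
    rw [iter_patients_from_seqs_alt]
    simp
  | cons w t =>
    conv_lhs => rw [iter_patients_from_seqs_alt]
    simp [List.length_pos_iff]

-- ===== VERDICT (by name: the statement is the Claim_ definition above) =====
theorem iter_patients_from_seqs_spec : Claim_equal_iter_patients_from_seqs := by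
  intro seqs _
  unfold Spec_iter_patients_from_seqs
  rw [alt_eq_ref]
  show finishA (seqs.foldl stepA ([], [])) = refSplit [] seqs
  rw [foldA_eq_ref seqs [] []]
  simp
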